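-- pv_equiv track=rewrite | github.com/Zshumake/LEARNEMG | Universal Scheduler/src/scheduler/services/pmr_rules_engine.py | _validate_no_same_day_call_moonlight
-- ===== SOURCE A (Python) =====
-- def _validate_no_same_day_call_moonlight(schedule, date):
--     """Validate no resident works both call and moonlight same day"""
--     call_residents = set(
--         [
--             a["resident_id"]
--             for a in schedule
--             if a["date"] == date and "call" in a["shift_type"]
--         ]
--     )
--     moonlight_residents = set(
--         [
--             a["resident_id"]
--             for a in schedule
--             if a["date"] == date and "moonlight" in a["shift_type"]
--         ]
--     )
--     return len(call_residents.intersection(moonlight_residents)) == 0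
-- ===== SOURCE B (Python) =====
-- def _validate_no_same_day_call_moonlight(schedule, date):
--     """Single early-exit pass: track call/moonlight residents seen so far."""
--     call_seen = set()
--     moon_seen = set()
--     for a in schedule:
--         if a["date"] != date:
--             continue
--         shift = a["shift_type"]
--         is_call = "call" in shift
--         is_moon = "moonlight" in shift
--         if not (is_call or is_moon):
--             continue
--         rid = a["resident_id"]
--         if is_call:
--             if rid in moon_seen:
--                 return False
--             call_seen.add(rid)
--         if is_moon:
--             if rid in call_seen:
--                 return False
--             moon_seen.add(rid)
--     return True
-- ===== Notes on version B (the rewrite author's own statement) =====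
-- stated objective: alternative
-- what changed: Replaces A's two full filter passes plus building two sets and intersecting them with one early-exit scan that maintains call/moonlight seen-sets and returns False at the first conflict.
import Mathlib
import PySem

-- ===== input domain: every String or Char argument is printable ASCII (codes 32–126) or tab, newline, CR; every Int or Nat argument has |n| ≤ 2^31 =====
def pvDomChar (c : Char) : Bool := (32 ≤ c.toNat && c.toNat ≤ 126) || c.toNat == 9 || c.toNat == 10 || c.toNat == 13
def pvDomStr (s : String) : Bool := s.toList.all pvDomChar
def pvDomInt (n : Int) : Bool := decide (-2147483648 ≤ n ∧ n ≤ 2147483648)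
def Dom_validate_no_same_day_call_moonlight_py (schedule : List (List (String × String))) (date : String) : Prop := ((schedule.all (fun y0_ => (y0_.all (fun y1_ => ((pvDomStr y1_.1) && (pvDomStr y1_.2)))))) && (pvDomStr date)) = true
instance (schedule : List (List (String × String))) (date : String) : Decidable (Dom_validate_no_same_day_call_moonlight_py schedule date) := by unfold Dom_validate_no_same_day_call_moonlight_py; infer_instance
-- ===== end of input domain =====

-- B replaces A's two filter passes + set intersection with a single early-exit
-- scan keeping two seen-sets (alternative decomposition, same O(n) cost).


-- ===== PORT A =====
-- a[k] on the association-list dict: first matching key (none = KeyError, excluded by Pre_)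
def pvLookup (a : List (String × String)) (k : String) : Option String :=
  (a.find? (fun p => p.1 == k)).map (·.2)

-- total accessor; Pre_ guarantees the key is present wherever it is read
def pvGetKey (a : List (String × String)) (k : String) : String :=
  (pvLookup a k).getD ""

def validate_no_same_day_call_moonlight_py (schedule : List (List (String × String))) (date : String) : Bool :=
  let call_residents := PySem.Set.ofList
    ((schedule.filter (fun a => pvGetKey a "date" == date && PySem.Str.isIn "call" (pvGetKey a "shift_type"))).map
      (fun a => pvGetKey a "resident_id"))
  let moonlight_residents := PySem.Set.ofList
    ((schedule.filter (fun a => pvGetKey a "date" == date && PySem.Str.isIn "moonlight" (pvGetKey a "shift_type"))).map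
      (fun a => pvGetKey a "resident_id"))
  PySem.Set.len (PySem.Set.inter call_residents moonlight_residents) == 0

-- ===== PORT B =====
def pvAltLoop (date : String) (callSeen moonSeen : PySem.Set String) : List (List (String × String)) → Bool
  | [] => true
  | a :: rest =>
    if pvGetKey a "date" == date then
      let shift := pvGetKey a "shift_type"
      let isCall := PySem.Str.isIn "call" shift
      let isMoon := PySem.Str.isIn "moonlight" shift
      if isCall || isMoon then
        let rid := pvGetKey a "resident_id"
        if isCall && PySem.Set.contains moonSeen rid then false
        else
          let callSeen' := if isCall then PySem.Set.add callSeen rid else callSeen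
          if isMoon && PySem.Set.contains callSeen' rid then false
          else pvAltLoop date callSeen' (if isMoon then PySem.Set.add moonSeen rid else moonSeen) rest
      else pvAltLoop date callSeen moonSeen rest
    else pvAltLoop date callSeen moonSeen rest

def validate_no_same_day_call_moonlight_py_alt (schedule : List (List (String × String))) (date : String) : Bool :=
  pvAltLoop date PySem.Set.empty PySem.Set.empty schedule

-- ===== PRECONDITION & SPEC =====
-- Pre_ = exactly the inputs where Python A returns (no KeyError): every assignment has a
-- "date" key, and each assignment matching the date has "shift_type", and also
-- "resident_id" when its shift_type contains "call" or "moonlight".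
def Pre_validate_no_same_day_call_moonlight_py (schedule : List (List (String × String))) (date : String) : Prop :=
  ∀ a ∈ schedule, (pvLookup a "date").isSome ∧
    (pvGetKey a "date" = date →
      (pvLookup a "shift_type").isSome ∧
      ((PySem.Str.isIn "call" (pvGetKey a "shift_type") = true ∨
        PySem.Str.isIn "moonlight" (pvGetKey a "shift_type") = true) →
        (pvLookup a "resident_id").isSome))
instance (schedule : List (List (String × String))) (date : String) : Decidable (Pre_validate_no_same_day_call_moonlight_py schedule date) := by unfold Pre_validate_no_same_day_call_moonlight_py; infer_instance

def pvWitness_validate_no_same_day_call_moonlight_py : (List (List (String × String))) × String :=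
  ([[("date", "d"), ("shift_type", "call"), ("resident_id", "r1")],
    [("date", "d"), ("shift_type", "moonlight"), ("resident_id", "r2")]], "d")

def Spec_validate_no_same_day_call_moonlight_py (schedule : List (List (String × String))) (date : String) (out : Bool) : Prop := out = validate_no_same_day_call_moonlight_py_alt schedule date
instance (schedule : List (List (String × String))) (date : String) (out : Bool) : Decidable (Spec_validate_no_same_day_call_moonlight_py schedule date out) := by unfold Spec_validate_no_same_day_call_moonlight_py; infer_instance

-- ===== CLAIM (what is proved, stated in full; the proofs are below) =====
def Claim_equal_validate_no_same_day_call_moonlight_py : Prop := ∀ (schedule : List (List (String × String))) (date : String), Dom_validate_no_same_day_call_moonlight_py schedule date → Pre_validate_no_same_day_call_moonlight_py schedule date → Spec_validate_no_same_day_call_moonlight_py schedule date (validate_no_same_day_call_moonlight_py schedule date)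

-- ===== LEMMAS AND PROOFS =====

-- A's two comprehension lists
def pvCalls (date : String) (l : List (List (String × String))) : List String :=
  (l.filter (fun a => pvGetKey a "date" == date && PySem.Str.isIn "call" (pvGetKey a "shift_type"))).map
    (fun a => pvGetKey a "resident_id")

def pvMoons (date : String) (l : List (List (String × String))) : List String :=
  (l.filter (fun a => pvGetKey a "date" == date && PySem.Str.isIn "moonlight" (pvGetKey a "shift_type"))).map
    (fun a => pvGetKey a "resident_id")

theorem pvA_true_iff (schedule : List (List (String × String))) (date : String) :
    validate_no_same_day_call_moonlight_py schedule date = true ↔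
    ∀ r ∈ pvCalls date schedule, r ∉ pvMoons date schedule := by
  unfold validate_no_same_day_call_moonlight_py pvCalls pvMoons
  simp only [PySem.Set.len, beq_iff_eq, Nat.cast_eq_zero, List.length_eq_zero_iff]
  constructor
  · intro h r hc hm
    have : r ∈ PySem.Set.inter
        (PySem.Set.ofList ((schedule.filter (fun a => pvGetKey a "date" == date && PySem.Str.isIn "call" (pvGetKey a "shift_type"))).map (fun a => pvGetKey a "resident_id")))
        (PySem.Set.ofList ((schedule.filter (fun a => pvGetKey a "date" == date && PySem.Str.isIn "moonlight" (pvGetKey a "shift_type"))).map (fun a => pvGetKey a "resident_id"))) := by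
      rw [PySem.Set.mem_inter]
      exact ⟨(PySem.Set.mem_ofList _ _).2 hc, (PySem.Set.mem_ofList _ _).2 hm⟩
    rw [h] at this
    exact List.not_mem_nil this
  · intro h
    by_contra hne
    rcases List.exists_mem_of_ne_nil _ hne with ⟨r, hr⟩
    rw [PySem.Set.mem_inter] at hr
    exact h r ((PySem.Set.mem_ofList _ _).1 hr.1) ((PySem.Set.mem_ofList _ _).1 hr.2)

theorem pvAltLoop_true_iff (date : String) (l : List (List (String × String)))
    (C M : PySem.Set String) :
    pvAltLoop date C M l = true ↔
      ((∀ r ∈ pvCalls date l, r ∉ M) ∧ (∀ r ∈ pvMoons date l, r ∉ C) ∧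
       (∀ r ∈ pvCalls date l, r ∉ pvMoons date l)) := by
  induction l generalizing C M with
  | nil => simp [pvAltLoop, pvCalls, pvMoons]
  | cons a rest ih =>
    by_cases hd : (pvGetKey a "date" == date) = true
    · by_cases hc : PySem.Str.isIn "call" (pvGetKey a "shift_type") = true
      <;> by_cases hm : PySem.Str.isIn "moonlight" (pvGetKey a "shift_type") = true
      <;> simp at hc hm
      · -- both substrings: loop is false, and rid is in both lists
        have hfalse : pvAltLoop date C M (a :: rest) = false := by
          simp only [pvAltLoop]
          by_cases hmem : (pvGetKey a "resident_id") ∈ M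
          · simp [hd, hc, hm, hmem]
          · have hin : (pvGetKey a "resident_id") ∈ PySem.Set.add C (pvGetKey a "resident_id") := by
              rw [PySem.Set.mem_add]; exact Or.inr rfl
            simp [hd, hc, hm, hmem, hin]
        have hl1 : pvCalls date (a :: rest) = pvGetKey a "resident_id" :: pvCalls date rest := by
          simp [pvCalls, hd, hc]
        have hl2 : pvMoons date (a :: rest) = pvGetKey a "resident_id" :: pvMoons date rest := by
          simp [pvMoons, hd, hm]
        rw [hfalse, hl1, hl2]
        constructor
        · intro h; exact absurd h (by simp)
        · rintro ⟨_, _, h3⟩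
          exact absurd List.mem_cons_self (h3 _ List.mem_cons_self)
      · -- call only
        have hl1 : pvCalls date (a :: rest) = pvGetKey a "resident_id" :: pvCalls date rest := by
          simp [pvCalls, hd, hc]
        have hl2 : pvMoons date (a :: rest) = pvMoons date rest := by
          simp [pvMoons, hd, hm]
        rw [hl1, hl2]
        by_cases hmem : pvGetKey a "resident_id" ∈ M
        · have hfalse : pvAltLoop date C M (a :: rest) = false := by
            simp [pvAltLoop, hd, hc, hm, hmem]
          rw [hfalse]
          constructor
          · intro h; exact absurd h (by simp)
          · rintro ⟨h1, _, _⟩; exact absurd hmem (h1 _ List.mem_cons_self)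
        · have hrec : pvAltLoop date C M (a :: rest) =
              pvAltLoop date (PySem.Set.add C (pvGetKey a "resident_id")) M rest := by
            simp [pvAltLoop, hd, hc, hm, hmem]
          rw [hrec, ih]
          constructor
          · rintro ⟨h1, h2, h3⟩
            refine ⟨?_, ?_, ?_⟩
            · intro r hr
              rcases List.mem_cons.1 hr with h | h
              · subst h; exact hmem
              · exact h1 r h
            · intro r hr hC
              exact (h2 r hr) (by rw [PySem.Set.mem_add]; exact Or.inl hC)
            · intro r hr
              rcases List.mem_cons.1 hr with h | h
              · subst h
                intro hmem2
                exact (h2 _ hmem2) (by rw [PySem.Set.mem_add]; exact Or.inr rfl)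
              · exact h3 r h
          · rintro ⟨h1, h2, h3⟩
            refine ⟨fun r hr => h1 r (List.mem_cons_of_mem _ hr), ?_, ?_⟩
            · intro r hr hadd
              rw [PySem.Set.mem_add] at hadd
              rcases hadd with h | h
              · exact h2 r hr h
              · subst h; exact h3 _ List.mem_cons_self hr
            · intro r hr; exact h3 r (List.mem_cons_of_mem _ hr)
      · -- moonlight only
        have hl1 : pvCalls date (a :: rest) = pvCalls date rest := by
          simp [pvCalls, hd, hc]
        have hl2 : pvMoons date (a :: rest) = pvGetKey a "resident_id" :: pvMoons date rest := by
          simp [pvMoons, hd, hm]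
        rw [hl1, hl2]
        by_cases hmem : pvGetKey a "resident_id" ∈ C
        · have hfalse : pvAltLoop date C M (a :: rest) = false := by
            simp [pvAltLoop, hd, hc, hm, hmem]
          rw [hfalse]
          constructor
          · intro h; exact absurd h (by simp)
          · rintro ⟨_, h2, _⟩; exact absurd hmem (h2 _ List.mem_cons_self)
        · have hrec : pvAltLoop date C M (a :: rest) =
              pvAltLoop date C (PySem.Set.add M (pvGetKey a "resident_id")) rest := by
            simp [pvAltLoop, hd, hc, hm, hmem]
          rw [hrec, ih]
          constructor
          · rintro ⟨h1, h2, h3⟩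
            refine ⟨?_, ?_, ?_⟩
            · intro r hr hM
              exact (h1 r hr) (by rw [PySem.Set.mem_add]; exact Or.inl hM)
            · intro r hr
              rcases List.mem_cons.1 hr with h | h
              · subst h; exact hmem
              · exact h2 r h
            · intro r hr hmm
              rcases List.mem_cons.1 hmm with h | h
              · subst h
                exact (h1 _ hr) (by rw [PySem.Set.mem_add]; exact Or.inr rfl)
              · exact h3 r hr h
          · rintro ⟨h1, h2, h3⟩
            refine ⟨?_, fun r hr => h2 r (List.mem_cons_of_mem _ hr), ?_⟩
            · intro r hr hadd
              rw [PySem.Set.mem_add] at hadd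
              rcases hadd with h | h
              · exact h1 r hr h
              · subst h; exact h3 _ hr List.mem_cons_self
            · intro r hr hmm
              exact h3 r hr (List.mem_cons_of_mem _ hmm)
      · -- date matches, neither substring
        have hstep : pvAltLoop date C M (a :: rest) = pvAltLoop date C M rest := by
          simp [pvAltLoop, hd, hc, hm]
        have h1 : pvCalls date (a :: rest) = pvCalls date rest := by
          simp [pvCalls, hd, hc]
        have h2 : pvMoons date (a :: rest) = pvMoons date rest := by
          simp [pvMoons, hd, hm]
        rw [hstep, h1, h2, ih]
    · -- date mismatch
      have hstep : pvAltLoop date C M (a :: rest) = pvAltLoop date C M rest := by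
        simp [pvAltLoop, hd]
      have h1 : pvCalls date (a :: rest) = pvCalls date rest := by
        simp [pvCalls, hd]
      have h2 : pvMoons date (a :: rest) = pvMoons date rest := by
        simp [pvMoons, hd]
      rw [hstep, h1, h2, ih]

-- ===== VERDICT (by name: the statement is the Claim_ definition above) =====
theorem validate_no_same_day_call_moonlight_py_spec : Claim_equal_validate_no_same_day_call_moonlight_py := by
  intro schedule date _ _
  unfold Spec_validate_no_same_day_call_moonlight_py
  have hB : validate_no_same_day_call_moonlight_py_alt schedule date = true ↔
      ∀ r ∈ pvCalls date schedule, r ∉ pvMoons date schedule := by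
    unfold validate_no_same_day_call_moonlight_py_alt
    rw [pvAltLoop_true_iff]
    constructor
    · rintro ⟨_, _, h3⟩; exact h3
    · intro h
      exact ⟨fun r _ hr => (List.not_mem_nil hr), fun r _ hr => (List.not_mem_nil hr), h⟩
  have := (pvA_true_iff schedule date).trans hB.symm
  exact Bool.coe_iff_coe.1 this
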